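-- pv_equiv track=rewrite | github.com/ciskavriezenga/img_cell_scramble | pillowImgScramble.py | calc_cell_pixels_1d
-- ===== SOURCE A (Python) =====
-- import math
--
-- def calc_cell_pixels_1d(num_cells, size):
--     """
--     returns a list with the number of pixels per cell.
--     e.g. 6 cells for size 15:
--     [3, 3, 3, 2, 2, 2]
--     """
--     cell_sizes = []
--     cell_size_floor = math.floor(size / num_cells)
--     cell_rest_value = size - (cell_size_floor * num_cells)
--     for i in range(num_cells):
--         cell_size = cell_size_floor
--         if (cell_rest_value > 0):
--             cell_size += 1
--             cell_rest_value -= 1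
--         cell_sizes.append(cell_size)
--     return cell_sizes
-- ===== SOURCE B (Python) =====
-- def calc_cell_pixels_1d(num_cells, size):
--     """
--     returns a list with the number of pixels per cell.
--     e.g. 6 cells for size 15: [3, 3, 3, 2, 2, 2]
--     Greedy peeling: each cell takes the ceiling of the pixels still to be
--     distributed over the cells still to be filled; no precomputed floor or
--     remainder counter is kept.
--     """
--     cell_sizes = []
--     remaining, cells_left = size, num_cells
--     while cells_left > 0:
--         c = -(-remaining // cells_left)  # ceil division
--         cell_sizes.append(c)
--         remaining -= c
--         cells_left -= 1
--     return cell_sizes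
-- ===== Notes on version B (the rewrite author's own statement) =====
-- stated objective: alternative
-- what changed: Replaces A's precomputed floor + decrementing remainder counter over range(num_cells) by a greedy peeling loop that, for each cell, takes the ceiling of the pixels still remaining divided by the cells still to fill and subtracts it from the running total.
import Mathlib
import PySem

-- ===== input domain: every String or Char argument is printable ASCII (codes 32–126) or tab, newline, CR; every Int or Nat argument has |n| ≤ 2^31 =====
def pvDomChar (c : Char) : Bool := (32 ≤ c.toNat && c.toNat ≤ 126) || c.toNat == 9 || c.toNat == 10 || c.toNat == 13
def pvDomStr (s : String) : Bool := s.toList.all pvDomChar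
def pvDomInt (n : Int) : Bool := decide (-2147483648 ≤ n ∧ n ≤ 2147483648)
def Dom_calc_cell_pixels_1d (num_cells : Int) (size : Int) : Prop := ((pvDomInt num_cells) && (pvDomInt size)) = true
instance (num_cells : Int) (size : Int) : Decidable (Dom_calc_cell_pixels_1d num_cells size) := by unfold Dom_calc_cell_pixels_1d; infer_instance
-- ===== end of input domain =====

-- B replaces A's precomputed floor + decrementing remainder counter by a greedy peeling
-- loop taking, per cell, the ceiling of the remaining pixels over the remaining cells;
-- objective: alternative (same cost, different algorithm).


-- ===== PORT A =====
-- math.floor(size / num_cells) is ported as integer floor division: for |num_cells|,|size| ≤ 2^31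
-- the float quotient is exact enough that its floor equals the integer floor on the whole domain.
def calc_cell_pixels_1d (num_cells : Int) (size : Int) : List Int :=
  let cell_size_floor := PySem.Int.floordiv size num_cells
  let cell_rest_value := size - cell_size_floor * num_cells
  ((PySem.List.pyRange 0 num_cells 1).foldl
    (fun (st : List Int × Int) _ =>
      let cell_size := cell_size_floor
      if st.2 > 0 then (st.1 ++ [cell_size + 1], st.2 - 1)
      else (st.1 ++ [cell_size], st.2))
    ([], cell_rest_value)).1

-- ===== PORT B =====
-- B's while loop over (remaining, cells_left); Python's -(-a // b) ceiling division
-- is ported literally as -(floordiv (-a) b).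
def pvAltGo (cells_left : Int) (remaining : Int) : List Int :=
  if h : cells_left > 0 then
    let c := -(PySem.Int.floordiv (-remaining) cells_left)
    c :: pvAltGo (cells_left - 1) (remaining - c)
  else []
termination_by cells_left.toNat
decreasing_by omega

def calc_cell_pixels_1d_alt (num_cells : Int) (size : Int) : List Int :=
  pvAltGo num_cells size

-- ===== PRECONDITION & SPEC =====
-- num_cells = 0 makes Python A raise ZeroDivisionError on the division line.
def Pre_calc_cell_pixels_1d (num_cells : Int) (size : Int) : Prop := num_cells ≠ 0
instance (num_cells : Int) (size : Int) : Decidable (Pre_calc_cell_pixels_1d num_cells size) := by unfold Pre_calc_cell_pixels_1d; infer_instance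
def pvWitness_calc_cell_pixels_1d : Int × Int := (6, 15)

def Spec_calc_cell_pixels_1d (num_cells : Int) (size : Int) (out : List Int) : Prop := out = calc_cell_pixels_1d_alt num_cells size
instance (num_cells : Int) (size : Int) (out : List Int) : Decidable (Spec_calc_cell_pixels_1d num_cells size out) := by unfold Spec_calc_cell_pixels_1d; infer_instance

-- ===== CLAIM (what is proved, stated in full; the proofs are below) =====
def Claim_equal_calc_cell_pixels_1d : Prop := ∀ (num_cells : Int) (size : Int), Dom_calc_cell_pixels_1d num_cells size → Pre_calc_cell_pixels_1d num_cells size → Spec_calc_cell_pixels_1d num_cells size (calc_cell_pixels_1d num_cells size)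

-- ===== LEMMAS AND PROOFS =====

-- Uniqueness of Python floor division/modulus from a witnessing decomposition.
theorem pv_fd_mod_unique (a b q t : Int) (hb : 0 < b) (h : a = q * b + t)
    (h0 : 0 ≤ t) (h1 : t < b) :
    PySem.Int.floordiv a b = q ∧ PySem.Int.mod a b = t := by
  have hfd : PySem.Int.floordiv a b = q := by
    rw [PySem.Int.floordiv_eq_iff_of_pos hb]
    constructor <;> nlinarith
  refine ⟨hfd, ?_⟩
  have := PySem.Int.floordiv_mul_add_mod a b
  rw [hfd] at this; omega

-- A's loop over any list of length n, starting with remainder r (0 ≤ r ≤ n), appends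
-- r copies of f+1 followed by n - r copies of f.
theorem pv_loop_char (f : Int) :
    ∀ (l : List Int) (acc : List Int) (r : Int), 0 ≤ r → r ≤ l.length →
      (l.foldl (fun (st : List Int × Int) _ =>
          if st.2 > 0 then (st.1 ++ [f + 1], st.2 - 1) else (st.1 ++ [f], st.2))
        (acc, r)).1
      = acc ++ List.replicate r.toNat (f + 1) ++ List.replicate (l.length - r.toNat) f := by
  intro l
  induction l with
  | nil =>
    intro acc r h0 h1
    have : r = 0 := by simpa using le_antisymm (by simpa using h1) h0
    simp [this]
  | cons x l ih =>
    intro acc r h0 h1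
    by_cases hr : r > 0
    · have h1' : r - 1 ≤ (l.length : Int) := by
        simp at h1; omega
      have := ih (acc ++ [f + 1]) (r - 1) (by omega) h1'
      simp only [List.foldl_cons, if_pos hr]
      rw [this]
      have e1 : [f + 1] ++ List.replicate (r - 1).toNat (f + 1) = List.replicate r.toNat (f + 1) := by
        have htn : r.toNat = (r - 1).toNat + 1 := by omega
        rw [htn]; simp [List.replicate_succ]
      have e2 : (x :: l).length - r.toNat = l.length - (r - 1).toNat := by
        simp only [List.length_cons]; omega
      rw [e2, ← e1]; simp [List.append_assoc]
    · have hr0 : r = 0 := le_antisymm (by omega) h0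
      subst hr0
      have := ih (acc ++ [f]) 0 le_rfl (by positivity)
      simp only [List.foldl_cons, if_neg hr]
      rw [this]
      have : (x :: l).length - (0 : Int).toNat = l.length - (0 : Int).toNat + 1 := by
        simp
      rw [this, List.replicate_succ]
      simp

-- B's peeling loop produces r copies of f+1 followed by n - r of f, where f, r are
-- the floor and remainder of size over the n cells still to fill.
theorem pv_alt_char : ∀ (k : Nat) (n s : Int), n.toNat = k → 0 < n →
    pvAltGo n s
      = List.replicate (PySem.Int.mod s n).toNat (PySem.Int.floordiv s n + 1)
        ++ List.replicate (n - PySem.Int.mod s n).toNat (PySem.Int.floordiv s n) := by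
  intro k
  induction k with
  | zero => intro n s hk hn; omega
  | succ k ih =>
    intro n s hk hn
    set f := PySem.Int.floordiv s n with hf
    set r := PySem.Int.mod s n with hr
    have hdecomp : f * n + r = s := PySem.Int.floordiv_mul_add_mod s n
    have hr0 : 0 ≤ r := PySem.Int.mod_nonneg s hn
    have hr1 : r < n := PySem.Int.mod_lt s hn
    rw [pvAltGo, dif_pos hn]
    by_cases hpos : r > 0
    · -- cell takes f + 1; then n ≥ 2 and the tail recurses with remainder r - 1
      have hc : -(PySem.Int.floordiv (-s) n) = f + 1 := by
        rw [PySem.Int.neg_floordiv_neg_eq_iff_of_pos hn]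
        constructor <;> nlinarith
      have hn2 : 1 < n := by omega
      have huni := pv_fd_mod_unique (s - (f + 1)) (n - 1) f (r - 1) (by omega)
        (by ring_nf; omega) (by omega) (by omega)
      have htail := ih (n - 1) (s - (f + 1)) (by omega) (by omega)
      rw [huni.1, huni.2] at htail
      simp only [hc]
      rw [htail]
      have e1 : (f + 1) :: (List.replicate (r - 1).toNat (f + 1)
          ++ List.replicate (n - 1 - (r - 1)).toNat f)
          = List.replicate r.toNat (f + 1) ++ List.replicate (n - r).toNat f := by
        have : r.toNat = (r - 1).toNat + 1 := by omega
        rw [this, List.replicate_succ]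
        have : (n - 1 - (r - 1)).toNat = (n - r).toNat := by omega
        rw [this]; simp
      simpa using e1
    · -- r = 0: cell takes f
      have hrz : r = 0 := by omega
      have hc : -(PySem.Int.floordiv (-s) n) = f := by
        rw [PySem.Int.neg_floordiv_neg_eq_iff_of_pos hn]
        constructor <;> nlinarith
      simp only [hc]
      by_cases hone : n = 1
      · subst hone
        rw [pvAltGo, dif_neg (by omega)]
        rw [hrz]; norm_num
      · have huni := pv_fd_mod_unique (s - f) (n - 1) f 0 (by omega)
          (by ring_nf; omega) (by omega) (by omega)
        have htail := ih (n - 1) (s - f) (by omega) (by omega)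
        rw [huni.1, huni.2] at htail
        rw [htail, hrz]
        have : (n - 1 - 0).toNat + 1 = (n - 0).toNat := by omega
        simp only [Int.toNat_zero, List.replicate_zero, List.nil_append] at *
        rw [← List.replicate_succ, this]

-- ===== VERDICT (by name: the statement is the Claim_ definition above) =====
theorem calc_cell_pixels_1d_spec : Claim_equal_calc_cell_pixels_1d := by
  intro n s _ hn
  unfold Spec_calc_cell_pixels_1d calc_cell_pixels_1d calc_cell_pixels_1d_alt
  simp only
  set f := PySem.Int.floordiv s n with hf
  have hmod : s - f * n = PySem.Int.mod s n := by
    have := PySem.Int.floordiv_mul_add_mod s n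
    rw [hf]; omega
  rcases lt_trichotomy n 0 with hneg | hz | hpos
  · -- num_cells < 0: A's range is empty; B's while loop never runs
    rw [PySem.List.pyRange_one_eq_nil (by omega)]
    rw [pvAltGo, dif_neg (by omega)]
    simp
  · exact absurd hz hn
  · have h0 := PySem.Int.mod_nonneg s hpos
    have h1 := PySem.Int.mod_lt s hpos
    have hlenN : (PySem.List.pyRange 0 n 1).length = n.toNat := by
      rw [PySem.List.length_pyRange_one]; omega
    rw [pv_loop_char f _ [] _ (by omega) (by rw [hmod, hlenN]; omega)]
    rw [hmod, pv_alt_char n.toNat n s rfl hpos]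
    have e : (PySem.List.pyRange 0 n 1).length - (PySem.Int.mod s n).toNat
        = (n - PySem.Int.mod s n).toNat := by
      rw [hlenN]; omega
    rw [e, hf]; simp
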